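-- pv_equiv track=rewrite | github.com/Nahuelbonet/pp_programacion_1 | Paquetes/max_juguetes_por_tipo.py | max_juguetes_por_tipo
-- ===== SOURCE A (Python) =====
-- def max_juguetes_por_tipo (inventario):
--     maximos= {}
--
--     for item in inventario:
--         tipo = item[1]
--         cantidad = item [2]
--         provincia = item[0]
--
--         if tipo not in maximos or cantidad > maximos [tipo][0]:
--             maximos[tipo] = (cantidad,provincia)
--
--     return maximos
-- ===== SOURCE B (Python) =====
-- def max_juguetes_por_tipo(inventario):
--     # Phase 1: group items by tipo, preserving encounter order.
--     grupos = {}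
--     for item in inventario:
--         grupos.setdefault(item[1], []).append(item)
--     # Phase 2: reduce each group with max (first maximal item wins ties).
--     resultado = {}
--     for tipo, items in grupos.items():
--         best = max(items, key=lambda it: it[2])
--         resultado[tipo] = (best[2], best[0])
--     return resultado
-- ===== Notes on version B (the rewrite author's own statement) =====
-- stated objective: alternative
-- what changed: Replaces A's single online max-maintaining loop with a two-phase index-then-reduce shape: first group the inventory by tipo into lists, then take max(key=cantidad) of each group (first maximal element, so ties keep the first-seen provincia exactly as A does).
import Mathlib
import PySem

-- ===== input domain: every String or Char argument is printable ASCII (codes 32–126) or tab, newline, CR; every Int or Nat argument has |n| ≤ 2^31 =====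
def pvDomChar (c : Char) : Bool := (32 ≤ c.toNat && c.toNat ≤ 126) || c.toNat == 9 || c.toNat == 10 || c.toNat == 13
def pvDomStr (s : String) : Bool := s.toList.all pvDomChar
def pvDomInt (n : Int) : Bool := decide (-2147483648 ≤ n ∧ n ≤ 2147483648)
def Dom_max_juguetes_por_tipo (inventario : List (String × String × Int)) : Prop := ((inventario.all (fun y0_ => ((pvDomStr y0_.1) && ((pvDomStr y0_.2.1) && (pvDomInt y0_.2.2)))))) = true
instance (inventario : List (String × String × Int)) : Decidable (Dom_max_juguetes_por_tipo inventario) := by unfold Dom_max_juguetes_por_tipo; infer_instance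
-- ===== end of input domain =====

-- B replaces A's online max-maintaining loop with a two-phase group-by-tipo then reduce-with-max shape (alternative decomposition, same cost).

-- ===== PORT A =====
-- loop body of A's 'for item in inventario' (kept as a named helper)
def pvAStep (maximos : PySem.Dict String (Int × String)) (item : String × String × Int) :
    PySem.Dict String (Int × String) :=
  -- 'if tipo not in maximos or cantidad > maximos[tipo][0]' (short-circuit via get?)
  match maximos.get? item.2.1 with
  | none => maximos.insert item.2.1 (item.2.2, item.1)
  | some v => if v.1 < item.2.2 then maximos.insert item.2.1 (item.2.2, item.1) else maximos

def max_juguetes_por_tipo (inventario : List (String × String × Int)) : List (String × Int × String) :=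
  (inventario.foldl pvAStep PySem.Dict.empty).items

-- ===== PORT B =====
-- phase 1 loop body: grupos.setdefault(item[1], []).append(item)
def pvGStep (grupos : PySem.Dict String (List (String × String × Int))) (item : String × String × Int) :
    PySem.Dict String (List (String × String × Int)) :=
  grupos.modify item.2.1 [] (fun g => g ++ [item])

-- phase 2 loop body: best = max(items, key=lambda it: it[2]); resultado[tipo] = (best[2], best[0])
def pvRStep (resultado : PySem.Dict String (Int × String)) (p : String × List (String × String × Int)) :
    PySem.Dict String (Int × String) :=
  match PySem.List.max? p.2 (fun it => it.2.2) with
  | some best => resultado.insert p.1 (best.2.2, best.1)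
  | none => resultado  -- unreachable: every group is nonempty

def max_juguetes_por_tipo_alt (inventario : List (String × String × Int)) : List (String × Int × String) :=
  let grupos := inventario.foldl pvGStep PySem.Dict.empty
  (grupos.items.foldl pvRStep PySem.Dict.empty).items

-- ===== PRECONDITION & SPEC =====
def Spec_max_juguetes_por_tipo (inventario : List (String × String × Int)) (out : List (String × Int × String)) : Prop := out = max_juguetes_por_tipo_alt inventario
instance (inventario : List (String × String × Int)) (out : List (String × Int × String)) : Decidable (Spec_max_juguetes_por_tipo inventario out) := by unfold Spec_max_juguetes_por_tipo; infer_instance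

-- ===== CLAIM (what is proved, stated in full; the proofs are below) =====
def Claim_equal_max_juguetes_por_tipo : Prop := ∀ (inventario : List (String × String × Int)), Dom_max_juguetes_por_tipo inventario → Spec_max_juguetes_por_tipo inventario (max_juguetes_por_tipo inventario)

-- ===== LEMMAS AND PROOFS =====

-- the per-key online reduction A performs, on Option state
def pvStepO (o : Option (Int × String)) (it : String × String × Int) : Option (Int × String) :=
  match o with
  | none => some (it.2.2, it.1)
  | some v => if v.1 < it.2.2 then some (it.2.2, it.1) else some v

-- the value B stores for a (nonempty) group
def pvConv (g : List (String × String × Int)) : Int × String :=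
  match PySem.List.max? g (fun it => it.2.2) with
  | some best => (best.2.2, best.1)
  | none => (0, "")


theorem pvAStep_get? (d : PySem.Dict String (Int × String)) (x : String × String × Int) (t : String) :
    (pvAStep d x).get? t = if x.2.1 = t then pvStepO (d.get? t) x else d.get? t := by
  unfold pvAStep pvStepO
  by_cases ht : x.2.1 = t
  · subst ht
    cases h : d.get? x.2.1 with
    | none => simp [PySem.Dict.get?_insert_self]
    | some v =>
      by_cases hlt : v.1 < x.2.2
      · simp [hlt, PySem.Dict.get?_insert_self]
      · simp [h, hlt]
  · have hne : t ≠ x.2.1 := fun hh => ht hh.symm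
    cases h : d.get? x.2.1 with
    | none => simp [ht, PySem.Dict.get?_insert_of_ne _ _ hne]
    | some v =>
      by_cases hlt : v.1 < x.2.2 <;> simp [hlt, ht, PySem.Dict.get?_insert_of_ne _ _ hne]

theorem pvA_get? (l : List (String × String × Int)) (d : PySem.Dict String (Int × String)) (t : String) :
    (l.foldl pvAStep d).get? t = (l.filter (fun it => it.2.1 == t)).foldl pvStepO (d.get? t) := by
  induction l generalizing d with
  | nil => rfl
  | cons x l ih =>
    simp only [List.foldl_cons, List.filter_cons]
    by_cases ht : x.2.1 = t
    · simp only [ht, beq_self_eq_true, if_pos, List.foldl_cons, ih, pvAStep_get?]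
    · have hb : (x.2.1 == t) = false := beq_eq_false_iff_ne.mpr ht
      simp only [hb, Bool.false_eq_true, ih, pvAStep_get?]
      simp [ht]

theorem pvAStep_keys (d : PySem.Dict String (Int × String)) (x : String × String × Int) :
    (pvAStep d x).keys = PySem.Set.add d.keys x.2.1 := by
  unfold pvAStep
  cases h : d.get? x.2.1 with
  | none =>
    have hc : d.contains x.2.1 = false := (PySem.Dict.get?_eq_none_iff_contains d _).mp h
    have hm : x.2.1 ∉ d.keys := fun hmem =>
      by simp [(PySem.Dict.contains_iff_mem_keys d _).mpr hmem] at hc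
    simp [PySem.Dict.keys_insert_of_not_contains d _ hc, PySem.Set.add_of_not_mem hm]
  | some v =>
    have hc : d.contains x.2.1 = true := by
      rcases hh : d.contains x.2.1 with _ | _
      · simp [(PySem.Dict.get?_eq_none_iff_contains d _).mpr hh] at h
      · rfl
    have hm : x.2.1 ∈ d.keys := (PySem.Dict.contains_iff_mem_keys d _).mp hc
    by_cases hlt : v.1 < x.2.2 <;>
      simp [hlt, PySem.Dict.keys_insert_of_contains d _ hc, PySem.Set.add_of_mem hm]

theorem pvA_keys (l : List (String × String × Int)) (d : PySem.Dict String (Int × String)) :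
    (l.foldl pvAStep d).keys = PySem.Set.update d.keys (l.map (fun it => it.2.1)) := by
  induction l generalizing d with
  | nil => rfl
  | cons x l ih =>
    simp only [List.foldl_cons, List.map_cons, PySem.Set.update_cons, ih, pvAStep_keys]

theorem pvG_getD (l : List (String × String × Int)) (d : PySem.Dict String (List (String × String × Int))) (t : String) :
    (l.foldl pvGStep d).getD t [] = d.getD t [] ++ l.filter (fun it => it.2.1 == t) := by
  induction l generalizing d with
  | nil => simp
  | cons x l ih =>
    simp only [List.foldl_cons, List.filter_cons, ih]
    unfold pvGStep
    by_cases ht : t = x.2.1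
    · have hb : (x.2.1 == t) = true := by simp [ht]
      simp [ht]
    · have hb : (x.2.1 == t) = false := beq_eq_false_iff_ne.mpr (fun h => ht h.symm)
      simp [PySem.Dict.getD_modify, ht, hb]

theorem pvR_items (L : List (String × List (String × String × Int))) (r : PySem.Dict String (Int × String))
    (hne : ∀ p ∈ L, p.2 ≠ []) (hfresh : ∀ p ∈ L, r.contains p.1 = false)
    (hnd : (L.map (fun p => p.1)).Nodup) :
    (L.foldl pvRStep r).items = r.items ++ L.map (fun p => (p.1, pvConv p.2)) := by
  induction L generalizing r with
  | nil => simp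
  | cons p L ih =>
    obtain ⟨b, hb⟩ : ∃ b, PySem.List.max? p.2 (fun it => it.2.2) = some b := by
      cases h : PySem.List.max? p.2 (fun it => it.2.2) with
      | none => exact absurd ((PySem.List.max?_eq_none_iff _ _).mp h) (hne p (List.mem_cons_self))
      | some b => exact ⟨b, rfl⟩
    have hstep : pvRStep r p = r.insert p.1 (b.2.2, b.1) := by unfold pvRStep; rw [hb]
    have hconv : pvConv p.2 = (b.2.2, b.1) := by unfold pvConv; rw [hb]
    simp only [List.map_cons, List.nodup_cons] at hnd
    rw [List.foldl_cons, hstep,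
      ih _ (fun q hq => hne q (List.mem_cons_of_mem _ hq))
        (fun q hq => by
          rw [PySem.Dict.contains_insert]
          have h1 : q.1 ≠ p.1 := fun he => hnd.1 (he ▸ List.mem_map_of_mem hq)
          simp [h1, hfresh q (List.mem_cons_of_mem _ hq)]) hnd.2,
      PySem.Dict.items_insert_of_not_contains r _ (hfresh p (List.mem_cons_self))]
    simp [hconv]

theorem pvMax_proj (g : List (String × String × Int)) (o : Option (String × String × Int)) :
    g.foldl pvStepO (o.map (fun it => (it.2.2, it.1))) =
      (g.foldl (fun acc x => match acc with
        | none => some x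
        | some m => if m.2.2 < x.2.2 then some x else some m) o).map (fun it => (it.2.2, it.1)) := by
  induction g generalizing o with
  | nil => rfl
  | cons x g ih =>
    rw [List.foldl_cons, List.foldl_cons, ← ih]
    congr 1
    cases o with
    | none => rfl
    | some m =>
      by_cases hlt : m.2.2 < x.2.2 <;> simp [pvStepO, hlt]

-- ===== VERDICT (by name: the statement is the Claim_ definition above) =====
theorem max_juguetes_por_tipo_spec : Claim_equal_max_juguetes_por_tipo := by
  intro inv _
  unfold Spec_max_juguetes_por_tipo max_juguetes_por_tipo max_juguetes_por_tipo_alt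
  have hGfold : inv.foldl pvGStep PySem.Dict.empty =
      inv.foldl (fun d (x : String × String × Int) => d.modify x.2.1 [] ((fun _ x g => g ++ [x]) d x)) PySem.Dict.empty := rfl
  have kG : (inv.foldl pvGStep PySem.Dict.empty).keys = PySem.Set.ofList (inv.map (fun it => it.2.1)) := by
    rw [hGfold, PySem.Dict.keys_foldl_modify_key inv (fun x => x.2.1) [] _ PySem.Dict.empty,
      PySem.Dict.keys_empty, PySem.Set.update_nil_left]
  have ndG : (inv.foldl pvGStep PySem.Dict.empty).keys.Nodup := by
    rw [hGfold]
    exact PySem.Dict.nodup_keys_foldl_modify_key inv (fun x => x.2.1) [] _ PySem.Dict.empty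
      (by rw [PySem.Dict.keys_empty]; exact List.nodup_nil)
  have gG : ∀ t, (inv.foldl pvGStep PySem.Dict.empty).getD t [] = inv.filter (fun it => it.2.1 == t) := by
    intro t; rw [pvG_getD]; simp [PySem.Dict.getD_empty]
  have hfilter_ne : ∀ t ∈ PySem.Set.ofList (inv.map (fun it => it.2.1)),
      inv.filter (fun it => it.2.1 == t) ≠ [] := by
    intro t ht
    obtain ⟨it, hit, rfl⟩ := List.mem_map.mp ((PySem.Set.mem_ofList _ _).mp ht)
    exact List.ne_nil_of_mem (List.mem_filter.mpr ⟨hit, by simp⟩)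
  have itemsG : (inv.foldl pvGStep PySem.Dict.empty).items =
      (inv.foldl pvGStep PySem.Dict.empty).keys.map
        (fun t => (t, (inv.foldl pvGStep PySem.Dict.empty).getD t [])) :=
    PySem.Dict.items_eq_map_keys _ ndG []
  have hne : ∀ p ∈ (inv.foldl pvGStep PySem.Dict.empty).items, p.2 ≠ [] := by
    intro p hp
    rw [itemsG] at hp
    obtain ⟨t, htk, rfl⟩ := List.mem_map.mp hp
    simp only [gG]
    exact hfilter_ne t (kG ▸ htk)
  have hndmap : ((inv.foldl pvGStep PySem.Dict.empty).items.map (fun p => p.1)).Nodup := ndG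
  rw [pvR_items _ _ hne (fun p _ => PySem.Dict.contains_empty _) hndmap]
  rw [PySem.Dict.items_eq_map_keys (inv.foldl pvAStep PySem.Dict.empty)
        (by rw [pvA_keys, PySem.Dict.keys_empty, PySem.Set.update_nil_left]; exact PySem.Set.nodup_ofList _)
        (0, ""),
      pvA_keys, PySem.Dict.keys_empty, PySem.Set.update_nil_left, itemsG, kG]
  have hie : (PySem.Dict.empty : PySem.Dict String (Int × String)).items = [] := rfl
  simp only [hie, List.nil_append, List.map_map]
  refine List.map_congr_left (fun t ht => ?_)
  simp only [Function.comp]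
  have hget : (inv.foldl pvAStep PySem.Dict.empty).getD t (0, "") =
      (((inv.filter (fun it => it.2.1 == t)).foldl (fun acc x => match acc with
          | none => some x
          | some m => if m.2.2 < x.2.2 then some x else some m) none).map
        (fun it => ((it.2.2 : Int), it.1))).getD (0, "") := by
    rw [PySem.Dict.getD_eq_get?_getD, pvA_get?, PySem.Dict.get?_empty, ← pvMax_proj]
    rfl
  have hmax : PySem.List.max? (inv.filter (fun it => it.2.1 == t)) (fun it => it.2.2) =
      (inv.filter (fun it => it.2.1 == t)).foldl (fun acc x => match acc with
        | none => some x
        | some m => if m.2.2 < x.2.2 then some x else some m) none := by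
    unfold PySem.List.max?
    congr 1
    funext acc x
    cases acc <;> rfl
  obtain ⟨b, hb⟩ : ∃ b, PySem.List.max? (inv.filter (fun it => it.2.1 == t)) (fun it => it.2.2) = some b := by
    cases h : PySem.List.max? (inv.filter (fun it => it.2.1 == t)) (fun it => it.2.2) with
    | none => exact absurd ((PySem.List.max?_eq_none_iff _ _).mp h) (hfilter_ne t ht)
    | some b => exact ⟨b, rfl⟩
  rw [hget, ← hmax, hb, gG]
  unfold pvConv
  rw [hb]
  rfl
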